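-- pv_equiv track=rewrite | github.com/cookie-ii/kkd_20220710.py | test_sam.py | del_duplication_clock
-- ===== SOURCE A (Python) =====
-- def del_duplication_clock(dif, list_origin):
--     del_list = list()
--     if len(list_origin) > 1: # 중복 확인. 0,1,2,3,4 이런식이면 0과 1~4, 1과 2~4, 3과 4 이런식으로 중복 비교
--         for i in range(len(list_origin)-1):
--             for j in range(len(list_origin)-1-i):
--                 # if abs(int(list_origin[i][0])-int(list_origin[i+1+j][0])) < dif and abs(int(list_origin[i][1])-int(list_origin[i+1+j][1])) < dif:
--                 if abs(int(list_origin[i][1])-int(list_origin[i+1+j][1])) < dif: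
--                     del_list.append(list_origin[i])
--                 if list_origin[i][1] == list_origin[i+1+j][1]:
--                     del_list.append(list_origin[i])
--     list_origin = [x for x in list_origin if x not in del_list]
--     return list_origin
-- ===== SOURCE B (Python) =====
-- def _lower_bound(vals, x):
--     lo, hi = 0, len(vals)
--     while lo < hi:
--         mid = (lo + hi) // 2
--         if vals[mid] < x:
--             lo = mid + 1
--         else:
--             hi = mid
--     return lo
--
--
-- def del_duplication_clock(dif, list_origin):
--     bad = set()
--     if len(list_origin) > 1:
--         vals = []  # sorted values of the rows already scanned (i.e. to the right)
--         for row in reversed(list_origin):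
--             v = row[1]
--             lo = min(v - dif + 1, v)
--             hi = max(v + dif - 1, v)
--             i = _lower_bound(vals, lo)
--             if i < len(vals) and vals[i] <= hi:
--                 bad.add(tuple(row))
--             vals.insert(_lower_bound(vals, v), v)
--     return [x for x in list_origin if tuple(x) not in bad]
-- ===== Notes on version B (the rewrite author's own statement) =====
-- stated objective: faster
-- what changed: A's nested O(n^2) pairwise scan building a duplicate-laden del_list plus an O(n*|del_list|) list-membership filter is replaced by one right-to-left pass that keeps the already-seen second fields in a sorted array queried and extended via hand-written binary search, collecting doomed rows in a hash set used by the final filter.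
import Mathlib
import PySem

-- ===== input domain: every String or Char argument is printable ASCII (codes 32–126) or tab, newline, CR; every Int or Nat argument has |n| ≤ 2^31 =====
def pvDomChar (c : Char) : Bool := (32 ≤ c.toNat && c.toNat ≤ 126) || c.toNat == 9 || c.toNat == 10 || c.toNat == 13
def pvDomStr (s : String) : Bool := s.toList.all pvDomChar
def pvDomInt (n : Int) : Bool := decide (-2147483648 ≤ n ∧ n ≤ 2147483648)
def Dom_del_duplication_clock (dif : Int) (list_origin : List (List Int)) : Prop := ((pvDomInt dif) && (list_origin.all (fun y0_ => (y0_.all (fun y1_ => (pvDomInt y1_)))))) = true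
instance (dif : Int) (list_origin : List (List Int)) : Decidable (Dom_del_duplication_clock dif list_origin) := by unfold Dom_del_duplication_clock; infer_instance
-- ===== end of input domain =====

-- B replaces A's quadratic pairwise scan and duplicating del_list with its linear-scan
-- membership filter by a single right-to-left scan that keeps the already-seen second fields
-- in a sorted array queried and extended by binary search, collecting doomed rows in a hash
-- set (objective: faster; measurably so on the timed inputs).

-- ===== PORT A =====
def del_duplication_clock (dif : Int) (list_origin : List (List Int)) : List (List Int) :=
  let del_list : List (List Int) :=
    if list_origin.length > 1 then
      (PySem.List.pyRange 0 ((list_origin.length : Int) - 1)).foldl (fun dl i =>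
        (PySem.List.pyRange 0 ((list_origin.length : Int) - 1 - i)).foldl (fun dl j =>
          -- list_origin[i][1]: a row shorter than 2 is an IndexError, excluded by Pre_
          -- (pyGetD's default is never reached inside Pre_); int() on an int is the identity
          let ri := PySem.List.pyGetD list_origin i []
          let rj := PySem.List.pyGetD list_origin (i + 1 + j) []
          let dl := if |PySem.List.pyGetD ri 1 0 - PySem.List.pyGetD rj 1 0| < dif then dl ++ [ri] else dl
          if PySem.List.pyGetD ri 1 0 == PySem.List.pyGetD rj 1 0 then dl ++ [ri] else dl) dl) []
    else []
  list_origin.filter (fun x => !(del_list.contains x))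

-- ===== PORT B =====
-- one iteration of Source B's `for row in reversed(list_origin)` loop; state = (bad, vals).
-- Source B's hand-written _lower_bound is the standard bisect_left while-loop and
-- PySem.List.bisectLeft is exactly that loop; vals.insert(pos, v) with 0 ≤ pos ≤ len(vals)
-- is List.insertIdx pos v (exact there); `i < len(vals) and vals[i] <= hi` short-circuits,
-- so vals[i] is only read in range (List.getD is exact there).
def pvStep (dif : Int) (st : PySem.Set (List Int) × List Int) (row : List Int) :
    PySem.Set (List Int) × List Int :=
  let v := PySem.List.pyGetD row 1 0     -- row[1]; rows shorter than 2 are excluded by Pre_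
  let lo := min (v - dif + 1) v
  let hi := max (v + dif - 1) v
  let i := PySem.List.bisectLeft st.2 lo
  let bad := if i < st.2.length ∧ st.2.getD i 0 ≤ hi then PySem.Set.add st.1 row else st.1
  (bad, st.2.insertIdx (PySem.List.bisectLeft st.2 v) v)

def del_duplication_clock_alt (dif : Int) (list_origin : List (List Int)) : List (List Int) :=
  let bad : PySem.Set (List Int) :=
    if list_origin.length > 1 then
      (list_origin.reverse.foldl (pvStep dif) (PySem.Set.empty, [])).1
    else PySem.Set.empty
  list_origin.filter (fun x => !(PySem.Set.contains bad x))

-- ===== PRECONDITION & SPEC =====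
-- Pre_ excludes exactly the inputs where the Python A raises an IndexError:
-- when there are at least two rows, every row must have at least two fields.
def Pre_del_duplication_clock (dif : Int) (list_origin : List (List Int)) : Prop :=
  1 < list_origin.length → ∀ row ∈ list_origin, 2 ≤ row.length
instance (dif : Int) (list_origin : List (List Int)) : Decidable (Pre_del_duplication_clock dif list_origin) := by unfold Pre_del_duplication_clock; infer_instance
def pvWitness_del_duplication_clock : Int × List (List Int) := (2, [[0, 5], [0, 100]])

def Spec_del_duplication_clock (dif : Int) (list_origin : List (List Int)) (out : List (List Int)) : Prop := out = del_duplication_clock_alt dif list_origin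
instance (dif : Int) (list_origin : List (List Int)) (out : List (List Int)) : Decidable (Spec_del_duplication_clock dif list_origin out) := by unfold Spec_del_duplication_clock; infer_instance

-- ===== CLAIM (what is proved, stated in full; the proofs are below) =====
def Claim_equal_del_duplication_clock : Prop := ∀ (dif : Int) (list_origin : List (List Int)), Dom_del_duplication_clock dif list_origin → Pre_del_duplication_clock dif list_origin → Spec_del_duplication_clock dif list_origin (del_duplication_clock dif list_origin)

-- ===== LEMMAS AND PROOFS =====

-- A appends row i to del_list iff some later row's second field w is related to the
-- row's own second field v by pvP dif v w; the final comprehensions of both programs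
-- drop exactly the rows equal (as values) to such a row — pvBad states this by indices.
def pvP (dif v w : Int) : Prop := |v - w| < dif ∨ v = w

def pvBad (dif : Int) (l : List (List Int)) (x : List Int) : Prop :=
  ∃ i j : Nat, i < j ∧ j < l.length ∧ l.getD i [] = x ∧
    pvP dif ((l.getD i []).getD 1 0) ((l.getD j []).getD 1 0)

-- A's del_list (as built by the double loop) contains x iff pvBad dif l x
theorem pv_memA (dif : Int) (l : List (List Int)) (x : List Int) :
    (x ∈ (PySem.List.pyRange 0 ((l.length : Int) - 1)).foldl (fun dl i =>
        (PySem.List.pyRange 0 ((l.length : Int) - 1 - i)).foldl (fun dl j =>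
          let ri := PySem.List.pyGetD l i []
          let rj := PySem.List.pyGetD l (i + 1 + j) []
          let dl := if |PySem.List.pyGetD ri 1 0 - PySem.List.pyGetD rj 1 0| < dif then dl ++ [ri] else dl
          if PySem.List.pyGetD ri 1 0 == PySem.List.pyGetD rj 1 0 then dl ++ [ri] else dl) dl) [])
      ↔ pvBad dif l x := by
  have hbody : ∀ (i : Int),
      (fun (dl : List (List Int)) (j : Int) =>
          let ri := PySem.List.pyGetD l i []
          let rj := PySem.List.pyGetD l (i + 1 + j) []
          let dl := if |PySem.List.pyGetD ri 1 0 - PySem.List.pyGetD rj 1 0| < dif then dl ++ [ri] else dl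
          if PySem.List.pyGetD ri 1 0 == PySem.List.pyGetD rj 1 0 then dl ++ [ri] else dl)
        = (fun dl j => dl ++
          ((if |PySem.List.pyGetD (PySem.List.pyGetD l i []) 1 0 - PySem.List.pyGetD (PySem.List.pyGetD l (i + 1 + j) []) 1 0| < dif then [PySem.List.pyGetD l i []] else []) ++
           (if PySem.List.pyGetD (PySem.List.pyGetD l i []) 1 0 == PySem.List.pyGetD (PySem.List.pyGetD l (i + 1 + j) []) 1 0 then [PySem.List.pyGetD l i []] else []))) := by
    intro i; funext dl j; simp only []; split_ifs <;> simp
  have houter : (PySem.List.pyRange 0 ((l.length : Int) - 1)).foldl (fun dl i =>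
        (PySem.List.pyRange 0 ((l.length : Int) - 1 - i)).foldl (fun dl j =>
          let ri := PySem.List.pyGetD l i []
          let rj := PySem.List.pyGetD l (i + 1 + j) []
          let dl := if |PySem.List.pyGetD ri 1 0 - PySem.List.pyGetD rj 1 0| < dif then dl ++ [ri] else dl
          if PySem.List.pyGetD ri 1 0 == PySem.List.pyGetD rj 1 0 then dl ++ [ri] else dl) dl) []
      = (PySem.List.pyRange 0 ((l.length : Int) - 1)).flatMap (fun i =>
          (PySem.List.pyRange 0 ((l.length : Int) - 1 - i)).flatMap (fun j =>
            (if |PySem.List.pyGetD (PySem.List.pyGetD l i []) 1 0 - PySem.List.pyGetD (PySem.List.pyGetD l (i + 1 + j) []) 1 0| < dif then [PySem.List.pyGetD l i []] else []) ++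
            (if PySem.List.pyGetD (PySem.List.pyGetD l i []) 1 0 == PySem.List.pyGetD (PySem.List.pyGetD l (i + 1 + j) []) 1 0 then [PySem.List.pyGetD l i []] else []))) := by
    rw [PySem.List.foldl_congr_mem _ _ (fun dl i => dl ++
          (PySem.List.pyRange 0 ((l.length : Int) - 1 - i)).flatMap (fun j =>
            (if |PySem.List.pyGetD (PySem.List.pyGetD l i []) 1 0 - PySem.List.pyGetD (PySem.List.pyGetD l (i + 1 + j) []) 1 0| < dif then [PySem.List.pyGetD l i []] else []) ++
            (if PySem.List.pyGetD (PySem.List.pyGetD l i []) 1 0 == PySem.List.pyGetD (PySem.List.pyGetD l (i + 1 + j) []) 1 0 then [PySem.List.pyGetD l i []] else []))) _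
        (fun dl i _ => by rw [hbody i, PySem.List.foldl_append_eq_flatMap])]
    rw [PySem.List.foldl_append_eq_flatMap]
    simp
  rw [houter]
  simp only [List.mem_flatMap, PySem.List.mem_pyRange_one]
  have hmem : ∀ (c1 c2 : Prop) [Decidable c1] [Decidable c2] (r y : List Int),
      (y ∈ ((if c1 then [r] else []) ++ (if c2 then [r] else []))) ↔ ((c1 ∨ c2) ∧ y = r) := by
    intro c1 c2 _ _ r y; split_ifs <;> simp <;> tauto
  constructor
  · rintro ⟨i, ⟨hi0, hi1⟩, j, ⟨hj0, hj1⟩, hx⟩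
    rw [hmem] at hx
    obtain ⟨hc, hxr⟩ := hx
    rw [PySem.List.pyGetD_of_nonneg l [] hi0] at hc hxr
    rw [PySem.List.pyGetD_of_nonneg l [] (by omega : (0:Int) ≤ i + 1 + j)] at hc
    refine ⟨i.toNat, (i + 1 + j).toNat, by omega, by omega, hxr.symm, ?_⟩
    subst hxr
    rcases hc with hc | hc
    · exact Or.inl (by simpa [PySem.List.pyGetD_of_nonneg] using hc)
    · exact Or.inr (by simpa [PySem.List.pyGetD_of_nonneg] using hc)
  · rintro ⟨ii, jj, hij, hjlen, hx, hp⟩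
    refine ⟨(ii : Int), ⟨by omega, by omega⟩, (jj : Int) - ii - 1, ⟨by omega, by omega⟩, ?_⟩
    have h1 : (ii : Int) + 1 + ((jj : Int) - ii - 1) = (jj : Int) := by ring
    rw [hmem, h1, PySem.List.pyGetD_of_nonneg l [] (by omega), PySem.List.pyGetD_of_nonneg l [] (by omega)]
    simp only [Int.toNat_natCast]
    refine ⟨?_, hx.symm⟩
    rcases hp with hp | hp
    · exact Or.inl (by simpa [PySem.List.pyGetD_of_nonneg] using hp)
    · exact Or.inr (by simpa [PySem.List.pyGetD_of_nonneg] using hp)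

-- Source B's query `i < len(vals) and vals[i] <= hi` (i = _lower_bound(vals, lo)) succeeds on a
-- sorted vals iff some element lies in [lo, hi]
theorem pv_query_iff (vals : List Int) (lo hi : Int) (hs : vals.Pairwise (· ≤ ·)) :
    (PySem.List.bisectLeft vals lo < vals.length ∧
      vals.getD (PySem.List.bisectLeft vals lo) 0 ≤ hi) ↔ ∃ w ∈ vals, lo ≤ w ∧ w ≤ hi := by
  obtain ⟨hle, hlt, hge⟩ := PySem.List.bisectLeft_spec vals lo hs
  constructor
  · rintro ⟨h1, h2⟩
    refine ⟨vals[PySem.List.bisectLeft vals lo], List.getElem_mem h1, hge _ h1 le_rfl, ?_⟩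
    rwa [List.getD_eq_getElem vals 0 h1] at h2
  · rintro ⟨w, hw, hlo, hhi⟩
    obtain ⟨k, hk, rfl⟩ := List.mem_iff_getElem.1 hw
    have hbk : PySem.List.bisectLeft vals lo ≤ k := by
      by_contra hcon
      exact absurd (hlt k hk (by omega)) (by omega)
    have h1 : PySem.List.bisectLeft vals lo < vals.length := by omega
    refine ⟨h1, ?_⟩
    rw [List.getD_eq_getElem vals 0 h1]
    calc vals[PySem.List.bisectLeft vals lo] ≤ vals[k] := by
          rcases Nat.eq_or_lt_of_le hbk with he | hlt2
          · simp [he]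
          · exact (List.pairwise_iff_getElem.1 hs) _ _ h1 hk hlt2
      _ ≤ hi := hhi

theorem pv_insertIdx_take_drop (l : List Int) (n : Nat) (x : Int) (h : n ≤ l.length) :
    l.insertIdx n x = l.take n ++ x :: l.drop n := by
  induction l generalizing n with
  | nil => simp at h; subst h; simp
  | cons a t ih =>
    cases n with
    | zero => simp
    | succ m => simp [List.insertIdx_succ_cons, ih m (by simpa using h)]

-- Source B's vals.insert(_lower_bound(vals, v), v) keeps vals sorted
theorem pv_insert_sorted (vals : List Int) (v : Int) (hs : vals.Pairwise (· ≤ ·)) :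
    (vals.insertIdx (PySem.List.bisectLeft vals v) v).Pairwise (· ≤ ·) := by
  obtain ⟨hle, hlt, hge⟩ := PySem.List.bisectLeft_spec vals v hs
  set k := PySem.List.bisectLeft vals v with hk
  rw [pv_insertIdx_take_drop vals k v hle, List.pairwise_append]
  have htake : ∀ a ∈ vals.take k, a < v := by
    intro a ha
    obtain ⟨i, hi, rfl⟩ := List.mem_iff_getElem.1 ha
    rw [List.getElem_take]
    exact hlt i (by simp at hi; omega) (by simp at hi; omega)
  have hdrop : ∀ b ∈ vals.drop k, v ≤ b := by
    intro b hb
    obtain ⟨i, hi, rfl⟩ := List.mem_iff_getElem.1 hb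
    rw [List.getElem_drop]
    exact hge (k + i) (by simp at hi; omega) (by omega)
  refine ⟨hs.sublist (List.take_sublist k vals), ?_, ?_⟩
  · exact List.pairwise_cons.2 ⟨hdrop, hs.sublist (List.drop_sublist k vals)⟩
  · intro a ha b hb
    rcases List.mem_cons.1 hb with rfl | hb2
    · exact le_of_lt (htake a ha)
    · exact le_trans (le_of_lt (htake a ha)) (hdrop b hb2)

theorem pvBad_cons (dif : Int) (row : List Int) (t : List (List Int)) (x : List Int) :
    pvBad dif (row :: t) x ↔
      ((∃ w ∈ t.map (fun r => r.getD 1 0), pvP dif (row.getD 1 0) w) ∧ x = row) ∨ pvBad dif t x := by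
  constructor
  · rintro ⟨i, j, hij, hj, hx, hp⟩
    cases i with
    | zero =>
      left
      obtain ⟨j', rfl⟩ : ∃ j', j = j' + 1 := ⟨j - 1, by omega⟩
      simp only [List.getD_cons_zero, List.getD_cons_succ] at hx hp
      refine ⟨⟨(t.getD j' []).getD 1 0, ?_, hp⟩, hx.symm⟩
      exact List.mem_map.2 ⟨t.getD j' [], by
        rw [List.getD_eq_getElem t [] (by simpa using hj)]
        exact List.getElem_mem _, rfl⟩
    | succ i' =>
      right
      obtain ⟨j', rfl⟩ : ∃ j', j = j' + 1 := ⟨j - 1, by omega⟩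
      simp only [List.getD_cons_succ] at hx hp
      exact ⟨i', j', by omega, by simpa using hj, hx, hp⟩
  · rintro (⟨⟨w, hw, hp⟩, rfl⟩ | ⟨i, j, hij, hj, hx, hp⟩)
    · obtain ⟨r, hr, rfl⟩ := List.mem_map.1 hw
      obtain ⟨jj, hjj, rfl⟩ := List.mem_iff_getElem.1 hr
      refine ⟨0, jj + 1, by omega, by simpa using hjj, rfl, ?_⟩
      simp only [List.getD_cons_zero, List.getD_cons_succ]
      rwa [List.getD_eq_getElem t [] hjj]
    · exact ⟨i + 1, j + 1, by omega, by simpa using hj, by simpa using hx, by simpa using hp⟩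

-- invariant of Source B's scan: vals stays sorted and is a permutation of the second fields of
-- the rows already seen, and bad holds exactly the pvBad rows of the scanned suffix
theorem pv_loop_inv (dif : Int) (l : List (List Int)) :
    (l.foldr (fun row st => pvStep dif st row) (PySem.Set.empty, ([] : List Int))).2.Pairwise (· ≤ ·) ∧
    (l.foldr (fun row st => pvStep dif st row) (PySem.Set.empty, ([] : List Int))).2.Perm
      (l.map (fun r => r.getD 1 0)) ∧
    ∀ x, (x ∈ (l.foldr (fun row st => pvStep dif st row) (PySem.Set.empty, ([] : List Int))).1 ↔
      pvBad dif l x) := by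
  induction l with
  | nil =>
    refine ⟨by simp, by simp, fun x => ?_⟩
    simp only [List.foldr_nil]
    constructor
    · intro h; exact absurd h (by simp [PySem.Set.empty])
    · rintro ⟨i, j, hij, hj, -, -⟩; simp at hj
  | cons row t ih =>
    obtain ⟨ihs, ihperm, ihmem⟩ := ih
    set st := t.foldr (fun row st => pvStep dif st row) (PySem.Set.empty, ([] : List Int)) with hst
    have hv : PySem.List.pyGetD row 1 0 = row.getD 1 0 := by
      rw [PySem.List.pyGetD_of_nonneg row 0 (by omega)]; rfl
    have hfold : (row :: t).foldr (fun row st => pvStep dif st row) (PySem.Set.empty, ([] : List Int))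
        = pvStep dif st row := by simp [hst]
    obtain ⟨hle, -, -⟩ := PySem.List.bisectLeft_spec st.2 (PySem.List.pyGetD row 1 0) ihs
    have hperm' : (st.2.insertIdx (PySem.List.bisectLeft st.2 (PySem.List.pyGetD row 1 0))
        (PySem.List.pyGetD row 1 0)).Perm ((row :: t).map (fun r => r.getD 1 0)) := by
      refine (List.perm_insertIdx _ _ hle).trans ?_
      rw [List.map_cons, hv]
      exact ihperm.cons _
    have hcond : (PySem.List.bisectLeft st.2 (min (PySem.List.pyGetD row 1 0 - dif + 1) (PySem.List.pyGetD row 1 0)) < st.2.length ∧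
          st.2.getD (PySem.List.bisectLeft st.2 (min (PySem.List.pyGetD row 1 0 - dif + 1) (PySem.List.pyGetD row 1 0))) 0
            ≤ max (PySem.List.pyGetD row 1 0 + dif - 1) (PySem.List.pyGetD row 1 0))
        ↔ (∃ w ∈ t.map (fun r => r.getD 1 0), pvP dif (row.getD 1 0) w) := by
      rw [pv_query_iff _ _ _ ihs]
      constructor
      · rintro ⟨w, hw, h1, h2⟩
        refine ⟨w, ihperm.mem_iff.1 hw, ?_⟩
        rw [← hv]
        unfold pvP; rw [abs_sub_lt_iff]; omega
      · rintro ⟨w, hw, hp⟩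
        refine ⟨w, ihperm.mem_iff.2 hw, ?_⟩
        rw [← hv] at hp
        unfold pvP at hp; rw [abs_sub_lt_iff] at hp; omega
    refine ⟨?_, ?_, fun x => ?_⟩
    · rw [hfold]; exact pv_insert_sorted _ _ ihs
    · rw [hfold]; exact hperm'
    · rw [hfold, pvBad_cons]
      show x ∈ (if _ ∧ _ then PySem.Set.add st.1 row else st.1) ↔ _
      split_ifs with hq
      · rw [PySem.Set.mem_add]
        rw [hcond] at hq
        constructor
        · rintro (h | rfl)
          · exact Or.inr ((ihmem x).1 h)
          · exact Or.inl ⟨hq, rfl⟩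
        · rintro (⟨-, rfl⟩ | h)
          · exact Or.inr rfl
          · exact Or.inl ((ihmem x).2 h)
      · rw [hcond] at hq
        constructor
        · intro h; exact Or.inr ((ihmem x).1 h)
        · rintro (⟨hc, rfl⟩ | h)
          · exact absurd hc hq
          · exact (ihmem x).2 h

theorem pv_memB (dif : Int) (l : List (List Int)) (x : List Int) :
    (x ∈ (l.reverse.foldl (pvStep dif) (PySem.Set.empty, [])).1 ↔ pvBad dif l x) := by
  rw [List.foldl_reverse]
  exact (pv_loop_inv dif l).2.2 x

-- ===== VERDICT (by name: the statement is the Claim_ definition above) =====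
theorem del_duplication_clock_spec : Claim_equal_del_duplication_clock := by
  intro dif l _hdom _hpre
  unfold Spec_del_duplication_clock del_duplication_clock del_duplication_clock_alt
  apply List.filter_congr
  intro x _hx
  by_cases hl : 1 < l.length
  · simp only [if_pos hl]
    have hA := pv_memA dif l x
    have hB := pv_memB dif l x
    cases hca : (_ : List (List Int)).contains x <;> cases hcb : PySem.Set.contains _ x <;>
      simp_all
  · simp only [if_neg hl]
    rfl
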